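-- pv_equiv track=rewrite | github.com/gholibqasobov/CodeWars | CodeWars/Keypad horror.py | computer_to_phone
-- ===== SOURCE A (Python) =====
-- def computer_to_phone(numbers):
--     new_num = ''
--     const = '0456'
--     upper = '789'
--     lower = '123'
--     for i in numbers:
--         if i in const:
--             new_num += i
--         elif i in upper:
--             new_num += str(int(i) - 6)
--         elif i in lower:
--             new_num += str(int(i) + 6)
--
--     return new_num
-- ===== SOURCE B (Python) =====
-- def _swap(c):
--     d = int(c)
--     if d == 0:
--         return c
--     r, q = divmod(d - 1, 3)
--     return str((2 - r) * 3 + q + 1)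
--
-- def computer_to_phone(numbers):
--     return ''.join(_swap(c) for c in numbers if c.isdigit())
-- ===== Notes on version B (the rewrite author's own statement) =====
-- stated objective: alternative
-- what changed: Replaced the three string-membership branches and int/str round-trips per digit by a single arithmetic row/column swap ((2-row)*3+col+1 with 0 fixed) applied through a filter-on-isdigit comprehension joined at the end, instead of appending to an accumulator string.
import Mathlib
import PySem

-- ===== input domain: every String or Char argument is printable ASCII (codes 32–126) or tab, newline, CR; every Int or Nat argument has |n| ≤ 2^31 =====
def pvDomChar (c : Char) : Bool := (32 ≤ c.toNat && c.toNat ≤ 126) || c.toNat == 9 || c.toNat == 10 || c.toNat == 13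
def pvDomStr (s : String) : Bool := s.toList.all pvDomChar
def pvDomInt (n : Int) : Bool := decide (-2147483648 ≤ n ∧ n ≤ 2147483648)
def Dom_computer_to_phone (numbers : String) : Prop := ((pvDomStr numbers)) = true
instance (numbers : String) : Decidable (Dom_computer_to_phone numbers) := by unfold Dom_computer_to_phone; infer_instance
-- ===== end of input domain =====

-- B replaces A's three string-membership branches and per-branch int/str arithmetic by one
-- arithmetic keypad row/column swap applied through a filter-on-isdigit comprehension (objective: alternative).


-- ===== PORT A =====
-- int(i) for the one-character loop variable i (the branch guarantees i is a digit, so ofStr? succeeds)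
def pvIntA (c : Char) : Int := (PySem.Int.ofStr? (String.mk [c])).getD 0

-- one iteration of A's for-loop; `i in '0456'` for a one-character i is character membership
def pvStepA (acc : List Char) (c : Char) : List Char :=
  if c ∈ ['0', '4', '5', '6'] then acc ++ [c]
  else if c ∈ ['7', '8', '9'] then acc ++ (PySem.Int.toStr (pvIntA c - 6)).toList
  else if c ∈ ['1', '2', '3'] then acc ++ (PySem.Int.toStr (pvIntA c + 6)).toList
  else acc

def computer_to_phone (numbers : String) : String :=
  String.mk (numbers.toList.foldl pvStepA [])

-- ===== PORT B =====
-- Source B's _swap: arithmetic row/column swap of one digit character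
def pvSwapB (c : Char) : List Char :=
  let d : Int := (PySem.Int.ofStr? (String.mk [c])).getD 0   -- int(c); c is a digit here
  if d = 0 then [c]
  else
    let r := PySem.Int.floordiv (d - 1) 3
    let q := PySem.Int.mod (d - 1) 3
    (PySem.Int.toStr ((2 - r) * 3 + q + 1)).toList

def computer_to_phone_alt (numbers : String) : String :=
  String.mk (((numbers.toList.filter PySem.Chars.isdigit).map pvSwapB).flatten)

-- ===== PRECONDITION & SPEC =====
def Spec_computer_to_phone (numbers : String) (out : String) : Prop := out = computer_to_phone_alt numbers
instance (numbers : String) (out : String) : Decidable (Spec_computer_to_phone numbers out) := by unfold Spec_computer_to_phone; infer_instance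

-- ===== CLAIM (what is proved, stated in full; the proofs are below) =====
def Claim_equal_computer_to_phone : Prop := ∀ (numbers : String), Dom_computer_to_phone numbers → Spec_computer_to_phone numbers (computer_to_phone numbers)

-- ===== LEMMAS AND PROOFS =====
lemma pv_digit_cases (c : Char) (h : PySem.Chars.isdigit c = true) :
    c = '0' ∨ c = '1' ∨ c = '2' ∨ c = '3' ∨ c = '4' ∨ c = '5' ∨ c = '6' ∨ c = '7' ∨ c = '8' ∨ c = '9' := by
  simp only [PySem.Chars.isdigit, Bool.and_eq_true, decide_eq_true_eq, Char.le_def,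
    UInt32.le_iff_toNat_le] at h
  obtain ⟨h1, h2⟩ := h
  have h1' : 48 ≤ c.toNat := h1
  have h2' : c.toNat ≤ 57 := h2
  have hc := Char.ofNat_toNat c
  interval_cases hn : c.toNat <;> (rw [← hc]; decide)

lemma pv_contrib_eq (acc : List Char) (c : Char) :
    pvStepA acc c = acc ++ (if PySem.Chars.isdigit c then pvSwapB c else []) := by
  by_cases hd : PySem.Chars.isdigit c = true
  · rcases pv_digit_cases c hd with rfl | rfl | rfl | rfl | rfl | rfl | rfl | rfl | rfl | rfl <;>
      simp [pvStepA] <;> decide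
  · have h1 : c ∉ (['0', '4', '5', '6'] : List Char) := by
      intro hm; apply hd; fin_cases hm <;> decide
    have h2 : c ∉ (['7', '8', '9'] : List Char) := by
      intro hm; apply hd; fin_cases hm <;> decide
    have h3 : c ∉ (['1', '2', '3'] : List Char) := by
      intro hm; apply hd; fin_cases hm <;> decide
    simp [pvStepA, h1, h2, h3, hd]

lemma pv_foldl_eq (l : List Char) (acc : List Char) :
    l.foldl pvStepA acc = acc ++ ((l.filter PySem.Chars.isdigit).map pvSwapB).flatten := by
  induction l generalizing acc with
  | nil => simp
  | cons c l ih =>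
    rw [List.foldl_cons, ih, pv_contrib_eq, List.filter_cons]
    by_cases hd : PySem.Chars.isdigit c = true <;> simp [hd]

-- ===== VERDICT (by name: the statement is the Claim_ definition above) =====
theorem computer_to_phone_spec : Claim_equal_computer_to_phone := by
  intro numbers _
  unfold Spec_computer_to_phone computer_to_phone computer_to_phone_alt
  rw [pv_foldl_eq, List.nil_append]
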